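-- pv_equiv track=rewrite | github.com/EricLeeuwenburgh/WINC---Data-Analytics-with-Python | Exercises/Module2/for/main.py | alphabet_set
-- ===== SOURCE A (Python) =====
-- def alphabet_set(countries):
--
--     alphabet = ['a', 'b', 'c', 'd', 'e', 'f', 'g', 'h', 'i', 'j', 'k', 'l', 'm', 'n', 'o', 'p', 'q', 'r', 's', 't', 'u', 'v', 'w', 'x', 'y', 'z']
--     countries_complete_alphabet = []
--
--     for country in countries:
--
--         for alphabet_letter in country.lower():
--             if alphabet_letter in alphabet:
--                 alphabet.remove(alphabet_letter)
--                 countries_complete_alphabet.append(country)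
--
--     return set(countries_complete_alphabet) # Using set() to remove duplicates from list.
-- ===== SOURCE B (Python) =====
-- def alphabet_set(countries):
--     # Letter-centric: for each of the 26 letters, find the index of the first
--     # country containing it; the answer is the countries at those indices.
--     lows = [c.lower() for c in countries]
--     idxs = set()
--     for letter in "abcdefghijklmnopqrstuvwxyz":
--         for i, low in enumerate(lows):
--             if letter in low:
--                 idxs.add(i)
--                 break
--     return {countries[i] for i in sorted(idxs)}
-- ===== Notes on version B (the rewrite author's own statement) =====
-- stated objective: alternative
-- what changed: Inverts the loop nesting: instead of A's single pass over countries that depletes an alphabet list and appends per consumed letter, B makes one scan per letter (26 staged passes) to find each letter's first-introducer index, then recovers the answer as the countries at the sorted set of those indices.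
import Mathlib
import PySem

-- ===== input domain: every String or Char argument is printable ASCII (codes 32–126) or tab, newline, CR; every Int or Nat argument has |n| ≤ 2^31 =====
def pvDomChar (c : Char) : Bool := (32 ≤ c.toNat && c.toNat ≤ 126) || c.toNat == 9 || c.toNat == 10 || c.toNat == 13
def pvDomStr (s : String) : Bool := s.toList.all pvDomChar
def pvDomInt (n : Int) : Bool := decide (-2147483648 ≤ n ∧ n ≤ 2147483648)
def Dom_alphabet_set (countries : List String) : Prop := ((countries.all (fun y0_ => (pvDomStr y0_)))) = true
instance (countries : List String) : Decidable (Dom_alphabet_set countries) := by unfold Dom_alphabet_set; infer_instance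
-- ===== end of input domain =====

-- B inverts the loop nesting (one scan per letter for its first-introducer index, then the
-- countries at the sorted indices) instead of A's single depleting-alphabet pass; alternative
-- algorithm of similar cost, proved to return exactly A's value.


-- the 26 lowercase letters: A's initial `alphabet` list; B's string "abcdefghijklmnopqrstuvwxyz"
def pvAZ : List Char :=
  ['a','b','c','d','e','f','g','h','i','j','k','l','m','n','o','p','q','r','s','t','u','v','w','x','y','z']

-- ===== PORT A =====
-- body of A's inner loop; under the guard `c ∈ alphabet`, Python's alphabet.remove(c) is
-- List.erase (first occurrence; exact by PySem.List.remove?_eq_some_erase)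
def pvStepA (country : String) (st : List Char × List String) (c : Char) : List Char × List String :=
  if c ∈ st.1 then (st.1.erase c, st.2 ++ [country]) else st

def alphabet_set (countries : List String) : List String :=
  let st := countries.foldl
    (fun st country => (PySem.Str.lower country).toList.foldl (pvStepA country) st)
    (pvAZ, [])
  PySem.Set.ofList st.2

-- ===== PORT B =====
-- Source B's inner `for i, low in enumerate(lows): if letter in low: …; break` — the search for the
-- first index whose string contains `letter` (membership of the 1-char `letter` in the string
-- `low` is exactly char membership in its character list)
def pvFindB (letter : Char) : List String → Nat → Option Nat
  | [], _ => none
  | low :: rest, i => if letter ∈ low.toList then some i else pvFindB letter rest (i + 1)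

-- `countries[i]` for an index i drawn from idxs is always in range; getD with default "" is exact there
def alphabet_set_alt (countries : List String) : List String :=
  let lows := countries.map PySem.Str.lower
  let idxs := pvAZ.foldl
    (fun (s : PySem.Set Nat) letter =>
      match pvFindB letter lows 0 with
      | some i => PySem.Set.add s i
      | none => s)
    PySem.Set.empty
  PySem.Set.ofList ((PySem.List.sorted idxs (fun x => x) false).map (fun i => countries.getD i ""))

-- ===== PRECONDITION & SPEC =====
def Spec_alphabet_set (countries : List String) (out : List String) : Prop := out = alphabet_set_alt countries
instance (countries : List String) (out : List String) : Decidable (Spec_alphabet_set countries out) := by unfold Spec_alphabet_set; infer_instance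

-- ===== CLAIM (what is proved, stated in full; the proofs are below) =====
def Claim_equal_alphabet_set : Prop := ∀ (countries : List String), Dom_alphabet_set countries → Spec_alphabet_set countries (alphabet_set countries)

-- ===== LEMMAS AND PROOFS =====

-- lowercased character list of a country
def pvLow (s : String) : List Char := (PySem.Str.lower s).toList

-- "country s contributes a letter new relative to the countries in prev"
def pvNew (prev : List String) (s : String) : Bool :=
  (pvLow s).any (fun c => decide (c ∈ pvAZ) && prev.all (fun p => decide (c ∉ pvLow p)))

-- the countries that contribute a new letter, in order (common characterisation of both ports)
def pvKept : List String → List String → List String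
  | _, [] => []
  | prev, s :: rest => (if pvNew prev s then [s] else []) ++ pvKept (prev ++ [s]) rest

theorem pv_countP_cons_mem (al : List Char) (c : Char) (q : Char → Bool)
    (h : al.Nodup) (hc : c ∈ al) :
    al.countP (fun x => x == c || q x)
      = 1 + (al.filter (fun x => !(x == c))).countP q := by
  induction al with
  | nil => simp at hc
  | cons a tl ih =>
    rcases List.nodup_cons.mp h with ⟨hna, hnd⟩
    by_cases hac : a = c
    · subst hac
      have h1 : tl.countP (fun x => x == a || q x) = tl.countP q := by
        apply List.countP_congr
        intro x hx
        have : ¬ (x = a) := fun e => hna (e ▸ hx)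
        simp [this]
      have h2 : tl.filter (fun x => !(x == a)) = tl := by
        apply List.filter_eq_self.mpr
        intro x hx
        have : ¬ (x = a) := fun e => hna (e ▸ hx)
        simp [this]
      simp [h1, h2, Nat.add_comm]
    · have hc' : c ∈ tl := by
        rcases List.mem_cons.mp hc with h' | h'
        · exact absurd h'.symm hac
        · exact h'
      have := ih hnd hc'
      have hne : (a == c) = false := by simp [hac]
      simp only [List.countP_cons, List.filter_cons, hne, Bool.not_false, if_true,
        Bool.false_or, this]
      omega

theorem pv_innerA (s : String) (cs : List Char) (al : List Char) (acc : List String)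
    (h : al.Nodup) :
    cs.foldl (pvStepA s) (al, acc)
      = (al.filter (fun c => decide (c ∉ cs)),
         acc ++ List.replicate (al.countP (fun c => decide (c ∈ cs))) s) := by
  induction cs generalizing al acc with
  | nil => simp
  | cons c cs' ih =>
    simp only [List.foldl_cons]
    by_cases hc : c ∈ al
    · have hstep : pvStepA s (al, acc) c = (al.erase c, acc ++ [s]) := by
        simp [pvStepA, hc]
      rw [hstep, h.erase_eq_filter]
      rw [ih _ _ (h.filter _)]
      simp only [Prod.mk.injEq]
      refine ⟨?_, ?_⟩
      · rw [List.filter_filter]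
        apply List.filter_congr
        intro x _
        by_cases hx : x = c <;> simp [hx]
      · have hcnt : al.countP (fun x => decide (x ∈ c :: cs'))
            = 1 + (al.filter (fun x => !(x == c))).countP (fun x => decide (x ∈ cs')) := by
          rw [← pv_countP_cons_mem al c (fun x => decide (x ∈ cs')) h hc]
          apply List.countP_congr
          intro x _
          by_cases hx : x = c <;> simp [hx]
        rw [hcnt, Nat.add_comm, List.replicate_succ]
        simp [bne]
    · have hstep : pvStepA s (al, acc) c = (al, acc) := by
        simp [pvStepA, hc]
      rw [hstep, ih _ _ h]
      simp only [Prod.mk.injEq]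
      refine ⟨?_, ?_⟩
      · apply List.filter_congr
        intro x hx
        have : ¬ (x = c) := fun e => hc (e ▸ hx)
        simp [this]
      · apply congrArg (fun m => acc ++ List.replicate m s)
        apply List.countP_congr
        intro x hx
        have : ¬ (x = c) := fun e => hc (e ▸ hx)
        simp [this]

theorem pv_ofList_append_replicate (acc : List String) (m : Nat) (s : String) :
    PySem.Set.ofList (acc ++ List.replicate m s)
      = if m = 0 then PySem.Set.ofList acc else PySem.Set.add (PySem.Set.ofList acc) s := by
  induction m with
  | zero => simp
  | succ m ih =>
    rw [List.replicate_succ', ← List.append_assoc, PySem.Set.ofList_append_singleton, ih]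
    by_cases hm : m = 0
    · simp [hm]
    · simp only [hm, if_false, if_neg (Nat.succ_ne_zero m)]
      exact PySem.Set.add_of_mem (by simp [PySem.Set.mem_add])

theorem pv_outerA (rest prev : List String) (al : List Char) (acc : List String)
    (hal : al = pvAZ.filter (fun c => prev.all (fun p => decide (c ∉ pvLow p)))) :
    PySem.Set.ofList
        ((rest.foldl (fun st country => (PySem.Str.lower country).toList.foldl (pvStepA country) st)
          (al, acc)).2)
      = (pvKept prev rest).foldl PySem.Set.add (PySem.Set.ofList acc) := by
  induction rest generalizing prev al acc with
  | nil => simp [pvKept]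
  | cons s rest' ih =>
    have hnd : al.Nodup := by
      rw [hal]; exact List.Nodup.filter _ (by decide : pvAZ.Nodup)
    simp only [List.foldl_cons]
    rw [pv_innerA s _ al acc hnd]
    have hal' : al.filter (fun c => decide (c ∉ (PySem.Str.lower s).toList))
        = pvAZ.filter (fun c => (prev ++ [s]).all (fun p => decide (c ∉ pvLow p))) := by
      rw [hal, List.filter_filter]
      apply List.filter_congr
      intro x _
      simp [pvLow, Bool.and_comm]
    rw [ih (prev ++ [s]) _ _ hal']
    have key : pvNew prev s = true
        ↔ 0 < al.countP (fun c => decide (c ∈ (PySem.Str.lower s).toList)) := by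
      rw [List.countP_pos_iff]
      unfold pvNew
      rw [List.any_eq_true]
      constructor
      · rintro ⟨c, hcs, hc⟩
        simp only [Bool.and_eq_true, decide_eq_true_eq] at hc
        refine ⟨c, ?_, by simpa [pvLow] using hcs⟩
        rw [hal, List.mem_filter]
        exact ⟨hc.1, hc.2⟩
      · rintro ⟨c, hcal, hcs⟩
        rw [hal, List.mem_filter] at hcal
        refine ⟨c, by simpa [pvLow] using hcs, ?_⟩
        simp only [Bool.and_eq_true, decide_eq_true_eq]
        exact ⟨hcal.1, by simpa [List.all_eq_true] using hcal.2⟩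
    rw [pv_ofList_append_replicate]
    simp only [pvKept, List.foldl_append]
    by_cases hnew : pvNew prev s = true
    · have hm : ¬ (al.countP (fun c => decide (c ∈ (PySem.Str.lower s).toList)) = 0) := by
        have := key.mp hnew; omega
      rw [if_neg hm, if_pos hnew]
      simp
    · have hm : al.countP (fun c => decide (c ∈ (PySem.Str.lower s).toList)) = 0 := by
        by_contra hne
        exact hnew (key.mpr (Nat.pos_of_ne_zero hne))
      rw [if_pos hm, if_neg hnew]
      simp

theorem pv_A_eq_kept (countries : List String) :
    alphabet_set countries = PySem.Set.ofList (pvKept [] countries) := by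
  unfold alphabet_set
  rw [pv_outerA countries [] pvAZ [] (by simp)]
  simp [PySem.Set.ofList_eq_foldl]

theorem pvFindB_eq_some (ℓ : Char) (lows : List String) (k m : Nat) :
    pvFindB ℓ lows k = some m
      ↔ ∃ j, j < lows.length ∧ m = k + j ∧ ℓ ∈ (lows.getD j "").toList
          ∧ ∀ j', j' < j → ℓ ∉ (lows.getD j' "").toList := by
  induction lows generalizing k m with
  | nil => simp [pvFindB]
  | cons low rest ih =>
    by_cases hmem : ℓ ∈ low.toList
    · simp only [pvFindB, if_pos hmem]
      constructor
      · intro h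
        have hmk : m = k := (Option.some.inj h).symm
        exact ⟨0, by simp, by omega, by simpa using hmem, by omega⟩
      · rintro ⟨j, hj, hm, hmj, hfirst⟩
        have hj0 : j = 0 := by
          by_contra hne
          exact (hfirst 0 (Nat.pos_of_ne_zero hne)) (by simpa using hmem)
        subst hj0
        simp [hm]
    · simp only [pvFindB, if_neg hmem]
      rw [ih (k + 1) m]
      constructor
      · rintro ⟨j, hj, hm, hmj, hfirst⟩
        refine ⟨j + 1, by simp only [List.length_cons]; omega, by omega, by simpa using hmj, ?_⟩
        intro j' hj'
        cases j' with
        | zero => simpa using hmem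
        | succ j'' => exact (by simpa using hfirst j'' (by omega))
      · rintro ⟨j, hj, hm, hmj, hfirst⟩
        cases j with
        | zero => exact absurd (by simpa using hmj) hmem
        | succ j'' =>
          refine ⟨j'', by simp only [List.length_cons] at hj; omega, by omega, by simpa using hmj, ?_⟩
          intro j' hj'
          exact (by simpa using hfirst (j' + 1) (by omega))

theorem pv_fold_add_nodup (l : List Char) (lows : List String) (S : PySem.Set Nat)
    (h : S.Nodup) :
    (l.foldl (fun (s : PySem.Set Nat) letter =>
      match pvFindB letter lows 0 with
      | some i => PySem.Set.add s i
      | none => s) S).Nodup := by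
  induction l generalizing S with
  | nil => exact h
  | cons a l ih =>
    simp only [List.foldl_cons]
    cases hf : pvFindB a lows 0 with
    | none => exact ih _ h
    | some i => exact ih _ (PySem.Set.nodup_add _ _ h)

theorem pv_mem_fold (l : List Char) (lows : List String) (S : PySem.Set Nat) (i : Nat) :
    i ∈ l.foldl (fun (s : PySem.Set Nat) letter =>
      match pvFindB letter lows 0 with
      | some i => PySem.Set.add s i
      | none => s) S
      ↔ i ∈ S ∨ ∃ ℓ ∈ l, pvFindB ℓ lows 0 = some i := by
  induction l generalizing S with
  | nil => simp
  | cons a l ih =>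
    simp only [List.foldl_cons]
    cases hf : pvFindB a lows 0 with
    | none =>
      rw [ih]
      simp only [List.mem_cons]
      constructor
      · rintro (h | ⟨ℓ, hℓ, he⟩)
        · exact Or.inl h
        · exact Or.inr ⟨ℓ, Or.inr hℓ, he⟩
      · rintro (h | ⟨ℓ, (rfl | hℓ), he⟩)
        · exact Or.inl h
        · exact absurd (hf ▸ he) (by simp)
        · exact Or.inr ⟨ℓ, hℓ, he⟩
    | some j =>
      rw [ih]
      simp only [PySem.Set.mem_add, List.mem_cons]
      constructor
      · rintro ((h | rfl) | ⟨ℓ, hℓ, he⟩)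
        · exact Or.inl h
        · exact Or.inr ⟨a, Or.inl rfl, hf⟩
        · exact Or.inr ⟨ℓ, Or.inr hℓ, he⟩
      · rintro (h | ⟨ℓ, (rfl | hℓ), he⟩)
        · exact Or.inl (Or.inl h)
        · exact Or.inl (Or.inr (by cases (hf ▸ he : some j = some i); rfl))
        · exact Or.inr ⟨ℓ, hℓ, he⟩

theorem pv_mem_idxs (countries : List String) (i : Nat) :
    (∃ ℓ ∈ pvAZ, pvFindB ℓ (countries.map PySem.Str.lower) 0 = some i)
      ↔ i < countries.length
        ∧ pvNew (countries.take i) (countries.getD i "") = true := by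
  have hget : ∀ j, j < countries.length →
      ((countries.map PySem.Str.lower).getD j "").toList = pvLow (countries.getD j "") := by
    intro j hj
    rw [List.getD_eq_getElem _ _ (by simpa using hj), List.getD_eq_getElem _ _ hj]
    simp [pvLow]
  constructor
  · rintro ⟨ℓ, hAZ, hfind⟩
    rcases (pvFindB_eq_some ℓ _ 0 i).mp hfind with ⟨j, hj, hij, hmem, hfirst⟩
    have hji : j = i := by omega
    subst hji
    have hjlen : j < countries.length := by simpa using hj
    refine ⟨hjlen, ?_⟩
    unfold pvNew
    rw [List.any_eq_true]
    refine ⟨ℓ, by rw [← hget j hjlen]; exact hmem, ?_⟩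
    simp only [Bool.and_eq_true, decide_eq_true_eq, List.all_eq_true]
    refine ⟨hAZ, ?_⟩
    intro p hp
    rcases List.mem_take_iff_getElem.mp hp with ⟨j', hj', rfl⟩
    have hj'j : j' < j := by omega
    have := hfirst j' hj'j
    rw [hget j' (by omega), List.getD_eq_getElem _ _ (show j' < countries.length by omega)] at this
    exact this
  · rintro ⟨hi, hnew⟩
    unfold pvNew at hnew
    rw [List.any_eq_true] at hnew
    rcases hnew with ⟨c, hcs, hc⟩
    simp only [Bool.and_eq_true, decide_eq_true_eq, List.all_eq_true] at hc
    refine ⟨c, hc.1, (pvFindB_eq_some c _ 0 i).mpr ⟨i, by simpa using hi, by omega, ?_, ?_⟩⟩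
    · rw [hget i hi]; exact hcs
    · intro j' hj'
      rw [hget j' (by omega)]
      apply hc.2
      rw [List.getD_eq_getElem _ _ (show j' < countries.length by omega)]
      exact List.mem_take_iff_getElem.mpr ⟨j', by omega, rfl⟩

theorem pv_sorted_idxs (countries : List String) :
    PySem.List.sorted
        (pvAZ.foldl (fun (s : PySem.Set Nat) letter =>
          match pvFindB letter (countries.map PySem.Str.lower) 0 with
          | some i => PySem.Set.add s i
          | none => s) PySem.Set.empty)
        (fun x => x) false
      = (List.range countries.length).filter
          (fun i => pvNew (countries.take i) (countries.getD i "")) := by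
  apply PySem.List.sorted_eq_of_perm_of_pairwise_lt
  · refine (List.perm_ext_iff_of_nodup
      (List.Nodup.filter _ List.nodup_range)
      (pv_fold_add_nodup pvAZ (countries.map PySem.Str.lower) PySem.Set.empty List.nodup_nil)).mpr ?_
    intro i
    rw [pv_mem_fold, List.mem_filter, List.mem_range, ← pv_mem_idxs countries i]
    simp [PySem.Set.empty]
  · exact List.Pairwise.filter _ List.pairwise_lt_range

theorem pv_kept_map (rest prev : List String) :
    ((List.range' prev.length rest.length).filter
        (fun i => pvNew ((prev ++ rest).take i) ((prev ++ rest).getD i ""))).map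
      (fun i => (prev ++ rest).getD i "")
      = pvKept prev rest := by
  induction rest generalizing prev with
  | nil => simp [pvKept]
  | cons s rest' ih =>
    have htake : (prev ++ s :: rest').take prev.length = prev := List.take_left' rfl
    have hget : (prev ++ s :: rest').getD prev.length "" = s := by
      rw [List.getD_eq_getElem _ _ (by simp)]
      simp
    simp only [List.length_cons, List.range'_succ, List.filter_cons, htake, hget]
    have e : prev ++ s :: rest' = (prev ++ [s]) ++ rest' := by simp
    have hlen : prev.length + 1 = (prev ++ [s]).length := by simp
    rw [e, hlen]
    simp only [pvKept]
    by_cases hnew : pvNew prev s = true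
    · rw [if_pos hnew, if_pos hnew, List.map_cons, ih (prev ++ [s])]
      simp only [List.singleton_append]
      congr 1
      rw [← e]
      exact hget
    · rw [if_neg hnew, if_neg hnew, ih (prev ++ [s])]
      simp

theorem pv_B_eq_kept (countries : List String) :
    alphabet_set_alt countries = PySem.Set.ofList (pvKept [] countries) := by
  unfold alphabet_set_alt
  dsimp only
  rw [pv_sorted_idxs countries]
  have := pv_kept_map countries []
  simp only [List.nil_append, List.length_nil] at this
  rw [← List.range_eq_range'] at this
  rw [this]

-- ===== VERDICT (by name: the statement is the Claim_ definition above) =====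
theorem alphabet_set_spec : Claim_equal_alphabet_set := by
  intro countries _
  unfold Spec_alphabet_set
  rw [pv_A_eq_kept, pv_B_eq_kept]
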